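-- pv_equiv track=rewrite | github.com/Oneplus/segerrparsing | src/ulits/cal_pos_f.py | convert
-- ===== SOURCE A (Python) =====
-- def convert(sentence):
--     '''
--
--     convert sentence to mid representation (word, start-id_end-id, pos)
--     :param sentence: type: word_pos
--     :return:
--     '''
--     mid_representation = []
--     sentence = sentence.strip().split()
--     start_id, end_id = 0, 0
--     for word_pos in sentence:
--         word, pos = word_pos.split('_')
--         end_id += len(word)
--         start_end_id = str(start_id) + '_' + str(end_id)
--         temp = (word, start_end_id, pos)
--         mid_representation.append(temp)
--         start_id = end_id
--
--     return mid_representation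
-- ===== SOURCE B (Python) =====
-- def convert(sentence):
--     # Phase 1: extract (word, pos) pairs.
--     pairs = []
--     for token in sentence.strip().split():
--         word, pos = token.split('_')
--         pairs.append((word, pos))
--     # Phase 2: cumulative character boundaries [0, e1, e2, ...].
--     boundaries = [0]
--     for word, _ in pairs:
--         boundaries.append(boundaries[-1] + len(word))
--     # Phase 3: pair each (word, pos) with consecutive boundaries (zip truncates).
--     return [(word, str(start) + '_' + str(end), pos)
--             for (word, pos), (start, end) in zip(pairs, zip(boundaries, boundaries[1:]))]
-- ===== Notes on version B (the rewrite author's own statement) =====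
-- stated objective: alternative
-- what changed: Replaces A's single pass with a running start/end accumulator by three phases: extract (word,pos) pairs, build a cumulative character-boundary table [0,e1,e2,...], then zip pairs with consecutive boundaries to emit the tuples.
import Mathlib
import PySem

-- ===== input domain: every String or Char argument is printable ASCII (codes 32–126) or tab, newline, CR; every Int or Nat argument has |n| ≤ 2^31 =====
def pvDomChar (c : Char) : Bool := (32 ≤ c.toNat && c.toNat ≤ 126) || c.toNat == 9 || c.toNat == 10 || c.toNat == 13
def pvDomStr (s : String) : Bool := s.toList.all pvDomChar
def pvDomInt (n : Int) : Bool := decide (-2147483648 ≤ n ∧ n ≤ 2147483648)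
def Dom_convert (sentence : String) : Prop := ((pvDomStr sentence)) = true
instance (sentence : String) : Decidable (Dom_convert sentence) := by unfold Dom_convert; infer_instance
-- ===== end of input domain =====

-- B rebuilds the same tuples in three phases (pair extraction, cumulative boundary table, zip) instead of A's single running-accumulator pass; equivalence proved on sentences whose whitespace tokens each contain exactly one underscore (elsewhere both Pythons raise ValueError).


-- ===== PORT A =====
-- the for-loop of A: state is the start offset plus the accumulated output; the tuple unpacking of
-- the underscore-split raises ValueError unless it yields exactly two parts (excluded by Pre_).
def convertLoopA (tokens : List String) (startId : Int)
    (acc : List (String × String × String)) : List (String × String × String) :=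
  match tokens with
  | [] => acc
  | t :: rest =>
    match PySem.Str.split? t "_" with
    | some [word, pos] =>
        let endId := startId + PySem.Str.len word
        let startEndId := PySem.Int.toStr startId ++ "_" ++ PySem.Int.toStr endId
        convertLoopA rest endId (acc ++ [(word, startEndId, pos)])
    | _ => acc

def convert (sentence : String) : List (String × String × String) :=
  convertLoopA (PySem.Str.split₀ (PySem.Str.strip sentence)) 0 []

-- ===== PORT B =====
-- phase 1 of Source B: the (word, pos) pairs; tokens whose underscore-split is not a pair raise ValueError and are outside Pre_
def convertPairs (tokens : List String) : List (String × String) :=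
  tokens.filterMap (fun t =>
    match PySem.Str.split? t "_" with
    | some [word, pos] => some (word, pos)
    | _ => none)

-- phase 2 of Source B: boundaries.append(boundaries[-1] + len(word)); the list is always nonempty,
-- so boundaries[-1] is its last element (getLastD 0)
def convertBounds (pairs : List (String × String)) : List Int :=
  pairs.foldl (fun bs wp => bs ++ [bs.getLastD 0 + PySem.Str.len wp.1]) [0]

def convert_alt (sentence : String) : List (String × String × String) :=
  let pairs := convertPairs (PySem.Str.split₀ (PySem.Str.strip sentence))
  let boundaries := convertBounds pairs
  (pairs.zip (boundaries.zip boundaries.tail)).map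
    (fun x => (x.1.1, PySem.Int.toStr x.2.1 ++ "_" ++ PySem.Int.toStr x.2.2, x.1.2))

-- ===== PRECONDITION & SPEC =====
-- Pre_ excludes sentences containing a whitespace token that does not split on underscore into
-- exactly two parts: on those both A and B raise ValueError at the tuple unpacking.
def Pre_convert (sentence : String) : Prop :=
  ∀ t ∈ PySem.Str.split₀ (PySem.Str.strip sentence), ((PySem.Str.split? t "_").getD []).length = 2
instance (sentence : String) : Decidable (Pre_convert sentence) := by unfold Pre_convert; infer_instance

def pvWitness_convert : String := "the_DT dog_NN ran_VBD"

def Spec_convert (sentence : String) (out : List (String × String × String)) : Prop := out = convert_alt sentence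
instance (sentence : String) (out : List (String × String × String)) : Decidable (Spec_convert sentence out) := by unfold Spec_convert; infer_instance

-- ===== CLAIM (what is proved, stated in full; the proofs are below) =====
def Claim_equal_convert : Prop := ∀ (sentence : String), Dom_convert sentence → Pre_convert sentence → Spec_convert sentence (convert sentence)

-- ===== LEMMAS AND PROOFS =====

-- proof-side reference: the common output, one token at a time from a given start offset
def convertSpecList (startId : Int) (tokens : List String) : List (String × String × String) :=
  match tokens with
  | [] => []
  | t :: rest =>
    match PySem.Str.split? t "_" with
    | some [word, pos] =>
        let endId := startId + PySem.Str.len word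
        (word, PySem.Int.toStr startId ++ "_" ++ PySem.Int.toStr endId, pos)
          :: convertSpecList endId rest
    | _ => []

-- trailing sums of word lengths from a start offset
def convertSums (s : Int) (pairs : List (String × String)) : List Int :=
  match pairs with
  | [] => []
  | wp :: rest => (s + PySem.Str.len wp.1) :: convertSums (s + PySem.Str.len wp.1) rest

theorem convertLoopA_eq (tokens : List String) :
    ∀ (startId : Int) (acc : List (String × String × String)),
    (∀ t ∈ tokens, ((PySem.Str.split? t "_").getD []).length = 2) →
    convertLoopA tokens startId acc = acc ++ convertSpecList startId tokens := by
  induction tokens with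
  | nil => intro s acc _; simp [convertLoopA, convertSpecList]
  | cons t rest ih =>
    intro s acc h
    have ht := h t (by simp)
    match hsplit : PySem.Str.split? t "_" with
    | some [word, pos] =>
      simp only [convertLoopA, convertSpecList, hsplit]
      rw [ih _ _ (fun x hx => h x (by simp [hx]))]
      simp
    | none => simp [hsplit] at ht
    | some [] => simp [hsplit] at ht
    | some [_] => simp [hsplit] at ht
    | some (_ :: _ :: _ :: _) => simp [hsplit] at ht

theorem convertBounds_fold (pairs : List (String × String)) :
    ∀ (init : List Int) (s : Int), init.getLastD 0 = s → init ≠ [] →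
    pairs.foldl (fun bs wp => bs ++ [bs.getLastD 0 + PySem.Str.len wp.1]) init
      = init ++ convertSums s pairs := by
  induction pairs with
  | nil => intro init s _ _; simp [convertSums]
  | cons wp rest ih =>
    intro init s hlast hne
    simp only [List.foldl_cons, convertSums]
    rw [ih (init ++ [init.getLastD 0 + PySem.Str.len wp.1])
          (s + PySem.Str.len wp.1) (by rw [List.getLastD_concat, hlast]) (by simp)]
    rw [hlast]
    simp

-- B's zip/map over the boundary table, unrolled one pair at a time
theorem convert_alt_eq (tokens : List String) :
    ∀ (s : Int),
    (∀ t ∈ tokens, ((PySem.Str.split? t "_").getD []).length = 2) →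
    ((convertPairs tokens).zip ((s :: convertSums s (convertPairs tokens)).zip
        (convertSums s (convertPairs tokens)))).map
      (fun x => (x.1.1, PySem.Int.toStr x.2.1 ++ "_" ++ PySem.Int.toStr x.2.2, x.1.2))
      = convertSpecList s tokens := by
  induction tokens with
  | nil => intro s _; simp [convertPairs, convertSums, convertSpecList]
  | cons t rest ih =>
    intro s h
    have ht := h t (by simp)
    match hsplit : PySem.Str.split? t "_" with
    | some [word, pos] =>
      simp only [convertPairs, List.filterMap_cons, hsplit, convertSpecList]
      simp only [convertSums, List.zip_cons_cons, List.map_cons]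
      exact congrArg _ (ih _ (fun x hx => h x (by simp [hx])))
    | none => simp [hsplit] at ht
    | some [] => simp [hsplit] at ht
    | some [_] => simp [hsplit] at ht
    | some (_ :: _ :: _ :: _) => simp [hsplit] at ht

-- ===== VERDICT (by name: the statement is the Claim_ definition above) =====
theorem convert_spec : Claim_equal_convert := by
  intro sentence _ hpre
  unfold Pre_convert at hpre
  unfold Spec_convert convert convert_alt
  have hb : convertBounds (convertPairs (PySem.Str.split₀ (PySem.Str.strip sentence)))
      = 0 :: convertSums 0 (convertPairs (PySem.Str.split₀ (PySem.Str.strip sentence))) := by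
    unfold convertBounds
    rw [convertBounds_fold _ [0] 0 rfl (by simp)]
    simp
  rw [convertLoopA_eq _ _ _ hpre]
  simp only [hb, List.tail_cons, List.nil_append]
  exact (convert_alt_eq _ 0 hpre).symm
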